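-- pv_equiv track=rewrite | github.com/Harrison-Hughes/project_euler | problem51.py | star_space_is_repeated_digit
-- ===== SOURCE A (Python) =====
-- def star_space_is_repeated_digit(compare_num, anti_indices):
--     star_digit = []
--     for i in range(len(compare_num)):
--         if i not in anti_indices:
--             if star_digit == []:
--                 star_digit = compare_num[i]
--             else:
--                 if not star_digit == compare_num[i]:
--                     return False
--     return True
-- ===== SOURCE B (Python) =====
-- def star_space_is_repeated_digit(compare_num, anti_indices):
--     selected = {compare_num[i] for i in range(len(compare_num)) if i not in anti_indices}
--     return len(selected) <= 1
-- ===== Notes on version B (the rewrite author's own statement) =====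
-- stated objective: simpler
-- what changed: Replaces the stateful scan with early exit and a running reference digit by a one-line set comprehension of the selected digits followed by a cardinality check len(selected) <= 1.
import Mathlib
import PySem

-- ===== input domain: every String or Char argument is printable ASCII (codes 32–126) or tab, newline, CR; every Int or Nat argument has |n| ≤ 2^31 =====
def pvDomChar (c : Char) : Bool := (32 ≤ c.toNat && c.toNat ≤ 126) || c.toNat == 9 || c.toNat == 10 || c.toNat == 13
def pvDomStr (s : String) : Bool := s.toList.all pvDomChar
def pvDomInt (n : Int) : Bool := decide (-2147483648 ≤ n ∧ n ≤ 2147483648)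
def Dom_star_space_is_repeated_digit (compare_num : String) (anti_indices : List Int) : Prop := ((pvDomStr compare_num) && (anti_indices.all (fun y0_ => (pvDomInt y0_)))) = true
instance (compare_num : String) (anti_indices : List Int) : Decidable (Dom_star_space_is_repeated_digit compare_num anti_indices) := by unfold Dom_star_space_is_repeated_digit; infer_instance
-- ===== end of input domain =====

-- B replaces A's stateful scan (running reference digit, early exit) by collecting the
-- selected digits into a set and checking its cardinality; objective: simpler.

-- ===== PORT A =====
-- A's loop: state is the current star_digit ([] = not yet seen, modelled as none since a
-- 1-char string never equals []); early 'return False' becomes returning false.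
def pvALoop (anti : List Int) : List (Int × Char) → Option Char → Bool
  | [], _ => true
  | (i, c) :: rest, st =>
    if i ∈ anti then pvALoop anti rest st
    else
      match st with
      | none => pvALoop anti rest (some c)
      | some d => if d == c then pvALoop anti rest (some d) else false

def star_space_is_repeated_digit (compare_num : String) (anti_indices : List Int) : Bool :=
  pvALoop anti_indices (PySem.List.enumerate compare_num.toList) none

-- ===== PORT B =====
def star_space_is_repeated_digit_alt (compare_num : String) (anti_indices : List Int) : Bool :=
  let selected : PySem.Set Char :=
    PySem.Set.ofList
      (((PySem.List.enumerate compare_num.toList).filter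
          (fun p => !decide (p.1 ∈ anti_indices))).map Prod.snd)
  decide (selected.length ≤ 1)

-- ===== PRECONDITION & SPEC =====
def Spec_star_space_is_repeated_digit (compare_num : String) (anti_indices : List Int) (out : Bool) : Prop := out = star_space_is_repeated_digit_alt compare_num anti_indices
instance (compare_num : String) (anti_indices : List Int) (out : Bool) : Decidable (Spec_star_space_is_repeated_digit compare_num anti_indices out) := by unfold Spec_star_space_is_repeated_digit; infer_instance

-- ===== CLAIM (what is proved, stated in full; the proofs are below) =====
def Claim_equal_star_space_is_repeated_digit : Prop := ∀ (compare_num : String) (anti_indices : List Int), Dom_star_space_is_repeated_digit compare_num anti_indices → Spec_star_space_is_repeated_digit compare_num anti_indices (star_space_is_repeated_digit compare_num anti_indices)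

-- ===== LEMMAS AND PROOFS =====

-- the A-loop with the indices filtered away
def pvGo : List Char → Option Char → Bool
  | [], _ => true
  | c :: r, none => pvGo r (some c)
  | c :: r, some d => if d == c then pvGo r (some d) else false

theorem pvALoop_eq_go (anti : List Int) :
    ∀ (ps : List (Int × Char)) (st : Option Char),
      pvALoop anti ps st =
        pvGo ((ps.filter (fun p => !decide (p.1 ∈ anti))).map Prod.snd) st := by
  intro ps
  induction ps with
  | nil => intro st; rfl
  | cons p rest ih =>
    intro st
    obtain ⟨i, c⟩ := p
    by_cases h : i ∈ anti
    · simp [pvALoop, h, ih]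
    · cases st with
      | none => simp [pvALoop, h, pvGo, ih]
      | some d =>
        by_cases hdc : d == c
        · simp [pvALoop, h, pvGo, hdc, ih]
        · simp [pvALoop, h, pvGo, hdc]

theorem pvGo_some (l : List Char) (d : Char) :
    pvGo l (some d) = l.all (fun c => d == c) := by
  induction l with
  | nil => rfl
  | cons c r ih =>
    by_cases h : d == c
    · simp_all [pvGo]
    · simp [pvGo, h]

theorem pvFoldl_add_singleton (r : List Char) (c : Char) :
    decide ((r.foldl PySem.Set.add [c]).length ≤ 1) = r.all (fun x => (c == x)) := by
  induction r with
  | nil => rfl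
  | cons x r' ih =>
    by_cases h : c = x
    · subst h
      simpa [PySem.Set.add, PySem.Set.contains] using ih
    · have hge : ∀ (t : List Char) (s : PySem.Set Char),
          s.length ≤ (t.foldl PySem.Set.add s).length := by
        intro t
        induction t with
        | nil => intro s; simp
        | cons y t' iht =>
          intro s
          refine le_trans ?_ (iht (PySem.Set.add s y))
          unfold PySem.Set.add
          split <;> simp
      have h2 : 2 ≤ ((r'.foldl PySem.Set.add [c, x]).length) := by
        simpa using hge r' [c, x]
      have hx : (c == x) = false := by simp [h]
      have hadd : PySem.Set.add [c] x = [c, x] := by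
        simp [PySem.Set.add]; exact fun hx => h hx.symm
      simp only [List.foldl_cons, List.all_cons, hadd, hx, Bool.false_and]
      simpa using by omega

theorem pvGo_none (l : List Char) :
    pvGo l none = decide ((PySem.Set.ofList l).length ≤ 1) := by
  cases l with
  | nil => rfl
  | cons c r =>
    have h1 : pvGo (c :: r) none = r.all (fun x => c == x) := by
      simp [pvGo, pvGo_some]
    have h2 : PySem.Set.ofList (c :: r) = r.foldl PySem.Set.add [c] := by
      simp [PySem.Set.ofList_eq_foldl, List.foldl_cons, PySem.Set.add, PySem.Set.contains]
    rw [h1, h2, pvFoldl_add_singleton]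
    

-- ===== VERDICT (by name: the statement is the Claim_ definition above) =====
theorem star_space_is_repeated_digit_spec : Claim_equal_star_space_is_repeated_digit := by
  intro compare_num anti_indices _
  unfold Spec_star_space_is_repeated_digit star_space_is_repeated_digit
    star_space_is_repeated_digit_alt
  rw [pvALoop_eq_go, pvGo_none]
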